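-- pv_equiv track=rewrite | github.com/RichardBrookfield/AOC | 2022/Day19.py | load_blueprints
-- ===== SOURCE A (Python) =====
-- from typing import Any, Dict, List, Optional
--
-- def resource_list() -> List[str]:
--     return ["ore", "clay", "obsidian", "geode"]
--
-- def load_blueprints(lines: List[str]) -> List[List[List[List[int]]]]:
--     blueprints: List[List[List[List[int]]]] = []
--
--     for line in lines:
--         line = line.rstrip("\n")
--
--         colons = line.split(":")
--
--         sentences = [r.strip(" ") for r in colons[1].split(".") if r]
--         recipes: List[List[List[int]]] = []
--
--         for s in sentences:
--             parts = s.split(" ")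
--             costs = parts[4:]
--
--             ingredients: List[List[int]] = []
--             while costs:
--                 ingredients.append([resource_list().index(costs[1]), int(costs[0])])
--                 if len(costs) > 3:
--                     costs = costs[3:]
--                 else:
--                     costs = None
--
--             recipes.append(ingredients)
--
--         blueprints.append(recipes)
--
--     return blueprints
-- ===== SOURCE B (Python) =====
-- from typing import List
--
-- def _ingredients(sentence: str) -> List[List[int]]:
--     names = ["ore", "clay", "obsidian", "geode"]
--     toks = sentence.strip(" ").split(" ")[4:]
--     return [[names.index(n), int(a)] for a, n in zip(toks[0::3], toks[1::3])]
--
-- def load_blueprints(lines: List[str]) -> List[List[List[List[int]]]]: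
--     return [[_ingredients(r)
--              for r in line.rstrip("\n").split(":")[1].split(".") if r]
--             for line in lines]
-- ===== Notes on version B (the rewrite author's own statement) =====
-- stated objective: idiomatic
-- what changed: The destructive `while costs: ... costs = costs[3:]` chunking loop (and the fold-style accumulation around it) is replaced by nested list comprehensions that zip the two stride-3 slices toks[0::3] and toks[1::3] into (amount, name) pairs.
import Mathlib
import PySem

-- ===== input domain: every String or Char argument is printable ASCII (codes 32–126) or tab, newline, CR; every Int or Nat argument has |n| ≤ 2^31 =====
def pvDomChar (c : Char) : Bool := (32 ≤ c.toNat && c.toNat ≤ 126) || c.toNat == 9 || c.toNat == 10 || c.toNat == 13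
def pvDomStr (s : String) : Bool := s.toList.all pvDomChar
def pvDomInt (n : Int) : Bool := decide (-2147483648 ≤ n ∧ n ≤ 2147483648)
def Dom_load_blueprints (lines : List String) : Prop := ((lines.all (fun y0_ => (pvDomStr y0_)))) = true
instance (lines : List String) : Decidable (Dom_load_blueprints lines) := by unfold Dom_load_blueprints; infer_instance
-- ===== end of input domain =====

-- B replaces A's destructive `while costs: ... costs = costs[3:]` chunking with a zip of the
-- two stride-3 slices `toks[0::3]`/`toks[1::3]` inside nested comprehensions (objective: idiomatic).


-- ===== PORT A =====
-- shared primitive helpers (both Pythons call the same built-ins)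
-- s.split(sep) for a non-empty literal sep (split? is none only for sep = "")
def pvSplit (s sep : String) : List String := (PySem.Str.split? s sep).getD []
-- hand port of s.rstrip("\n") (PySem has no rstrip-with-chars form): drop the trailing '\n'
-- characters; exact, since Python removes exactly the maximal trailing run of chars of "\n"
def pvRstripNL (s : String) : String := String.ofList ((s.toList.reverse.dropWhile (· == '\n')).reverse)
-- port of resource_list()
def pvResourceList : List String := ["ore", "clay", "obsidian", "geode"]

-- A's inner `while costs:` loop: build one ingredient from costs[0..1], then costs = costs[3:]
-- (or stop when len(costs) <= 3); Python raising points (costs[1], int(), .index()) are the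
-- .getD defaults, excluded by Pre_.
def pvChunkA (costs : List String) : List (List Int) :=
  if _h : costs = [] then []
  else
    let ing : List Int :=
      [(((PySem.List.index? pvResourceList ((PySem.List.pyGet? costs 1).getD "")).getD 0 : Nat) : Int),
       (PySem.Int.ofStr? ((PySem.List.pyGet? costs 0).getD "")).getD 0]
    if _h3 : 3 < costs.length then ing :: pvChunkA (PySem.List.slice costs (some 3) none)
    else [ing]
termination_by costs.length
decreasing_by
  rw [PySem.List.slice_from costs (by norm_num)]
  simp only [List.length_drop]
  omega

def load_blueprints (lines : List String) : List (List (List (List Int))) :=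
  lines.foldl (fun blueprints line0 =>
    let line := pvRstripNL line0
    let colons := pvSplit line ":"
    let sentences := ((pvSplit ((PySem.List.pyGet? colons 1).getD "") ".").filter
        (fun r => r ≠ "")).map (fun r => PySem.Str.stripChars r " ")
    let recipes := sentences.foldl (fun recipes s =>
      let parts := pvSplit s " "
      let costs := PySem.List.slice parts (some 4) none
      recipes ++ [pvChunkA costs]) []
    blueprints ++ [recipes]) []

-- ===== PORT B =====
-- Source B's _ingredients: zip the stride-3 slices toks[0::3] and toks[1::3]
def pvIngredientsB (sentence : String) : List (List Int) :=
  let toks := PySem.List.slice (pvSplit (PySem.Str.stripChars sentence " ") " ") (some 4) none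
  let amounts := (PySem.List.slice? toks (some 0) none 3).getD []
  let names := (PySem.List.slice? toks (some 1) none 3).getD []
  (amounts.zip names).map (fun an =>
    [(((PySem.List.index? pvResourceList an.2).getD 0 : Nat) : Int),
     (PySem.Int.ofStr? an.1).getD 0])

def load_blueprints_alt (lines : List String) : List (List (List (List Int))) :=
  lines.map (fun line =>
    ((pvSplit ((PySem.List.pyGet? (pvSplit (pvRstripNL line) ":") 1).getD "") ".").filter
        (fun r => r ≠ "")).map pvIngredientsB)

-- ===== PRECONDITION & SPEC =====
-- the token list parts[4:] of a sentence r
def pvCosts (r : String) : List String := (pvSplit (PySem.Str.stripChars r " ") " ").drop 4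

-- Exactly the inputs where the Python A returns normally: every line has a ':' (else
-- colons[1] is an IndexError), every sentence's cost-token count is ≢ 1 (mod 3) (else
-- costs[1] is an IndexError at the last chunk), and every chunk has a valid int literal
-- and a known resource name (else ValueError).
def Pre_load_blueprints (lines : List String) : Prop :=
  ∀ line ∈ lines,
    2 ≤ (pvSplit (pvRstripNL line) ":").length ∧
    ∀ r ∈ pvSplit ((PySem.List.pyGet? (pvSplit (pvRstripNL line) ":") 1).getD "") ".",
      r ≠ "" →
        (pvCosts r).length % 3 ≠ 1 ∧
        ∀ k < (pvCosts r).length, 3 * k < (pvCosts r).length →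
          (PySem.Int.ofStr? ((pvCosts r).getD (3 * k) "")).isSome = true ∧
          (pvCosts r).getD (3 * k + 1) "" ∈ pvResourceList

instance (lines : List String) : Decidable (Pre_load_blueprints lines) := by
  unfold Pre_load_blueprints; infer_instance

def pvWitness_load_blueprints : List String :=
  ["Blueprint 1: Each ore robot costs 4 ore. Each geode robot costs 2 ore and 7 obsidian."]


def Spec_load_blueprints (lines : List String) (out : List (List (List (List Int)))) : Prop := out = load_blueprints_alt lines
instance (lines : List String) (out : List (List (List (List Int)))) : Decidable (Spec_load_blueprints lines out) := by unfold Spec_load_blueprints; infer_instance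

-- ===== CLAIM (what is proved, stated in full; the proofs are below) =====
def Claim_equal_load_blueprints : Prop := ∀ (lines : List String), Dom_load_blueprints lines → Pre_load_blueprints lines → Spec_load_blueprints lines (load_blueprints lines)

-- ===== LEMMAS AND PROOFS =====

-- the [index, amount] ingredient read at chunk k of a token list
def pvIngAt (costs : List String) (k : Nat) : List Int :=
  [(((PySem.List.index? pvResourceList (costs.getD (3 * k + 1) "")).getD 0 : Nat) : Int),
   (PySem.Int.ofStr? (costs.getD (3 * k) "")).getD 0]

lemma getD_eq_pyGetD (xs : List String) (n : Nat) :
    (PySem.List.pyGet? xs (n : Int)).getD "" = xs.getD n "" := by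
  simp only [PySem.List.pyGet?, PySem.List.pyIdx?]
  norm_num
  split_ifs with hlt
  · simp
  · rw [List.getElem?_eq_none (by omega)]
    rfl

lemma ingAt_zero (costs : List String) :
    pvIngAt costs 0 =
      [(((PySem.List.index? pvResourceList ((PySem.List.pyGet? costs 1).getD "")).getD 0 : Nat) : Int),
       (PySem.Int.ofStr? ((PySem.List.pyGet? costs 0).getD "")).getD 0] := by
  have h1 := getD_eq_pyGetD costs 1
  have h0 := getD_eq_pyGetD costs 0
  norm_num at h1 h0
  simp [pvIngAt, h1, h0]

lemma ingAt_succ (costs : List String) (k : Nat) :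
    pvIngAt costs (k + 1) = pvIngAt (costs.drop 3) k := by
  have e1 : 3 * (k + 1) = 3 + 3 * k := by omega
  simp only [pvIngAt, List.getD, List.getElem?_drop, e1]
  ring_nf

lemma slice3_eq (parts : List String) :
    PySem.List.slice parts (some 3) none = parts.drop 3 := by
  rw [PySem.List.slice_from parts (by norm_num)]; simp

lemma slice4_eq (parts : List String) :
    PySem.List.slice parts (some 4) none = parts.drop 4 := by
  rw [PySem.List.slice_from parts (by norm_num)]; simp

lemma stride0_eq (xs : List String) :
    (PySem.List.slice? xs (some 0) none 3).getD [] =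
      (List.range ((xs.length + 2) / 3)).map (fun k => xs.getD (3 * k) "") := by
  simp only [PySem.List.slice?, PySem.List.sliceIndices]
  norm_num
  have hc : (if 0 < xs.length then (((xs.length : Int) + 3 - 1) / 3).toNat else 0) = (xs.length + 2) / 3 := by
    split_ifs with h <;> omega
  rw [hc]
  apply List.filterMap_eq_map_iff_forall_eq_some.mpr
  intro k hk
  simp only [List.mem_range] at hk
  have hlt : 3 * k < xs.length := by omega
  have ht : ((3 : Int) * (k : Int)).toNat = 3 * k := by omega
  simp [ht, hlt]

lemma stride1_eq (xs : List String) :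
    (PySem.List.slice? xs (some 1) none 3).getD [] =
      (List.range ((xs.length + 1) / 3)).map (fun k => xs.getD (3 * k + 1) "") := by
  simp only [PySem.List.slice?, PySem.List.sliceIndices]
  norm_num
  rcases Nat.eq_zero_or_pos xs.length with h0 | h0
  · simp [List.eq_nil_of_length_eq_zero h0]
  have hmin : min (1 : Int) (xs.length : Int) = 1 := by omega
  rw [hmin]
  have hc : (if 1 < xs.length then (((xs.length : Int) - 1 + 3 - 1) / 3).toNat else 0) = (xs.length + 1) / 3 := by
    split_ifs with h <;> omega
  rw [hc]
  apply List.filterMap_eq_map_iff_forall_eq_some.mpr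
  intro k hk
  simp only [List.mem_range] at hk
  have hlt : 3 * k + 1 < xs.length := by omega
  have ht : ((1 : Int) + 3 * (k : Int)).toNat = 3 * k + 1 := by omega
  simp [ht, hlt]

lemma zip_range_eq {α β : Type} (f : Nat → α) (g : Nat → β) (c0 c1 : Nat) (h : c1 ≤ c0) :
    ((List.range c0).map f).zip ((List.range c1).map g) = (List.range c1).map (fun k => (f k, g k)) := by
  rw [List.zip_map]
  rw [show (List.range c0).zip (List.range c1) = (List.range c1).map (fun k => (k, k)) from ?_]
  · simp [Function.comp]
  · apply List.ext_getElem
    · simp [Nat.min_eq_right h]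
    · intro i h1 h2; simp_all

lemma chunkA_eq (costs : List String) (h : costs.length % 3 ≠ 1) :
    pvChunkA costs = (List.range ((costs.length + 1) / 3)).map (pvIngAt costs) := by
  fun_induction pvChunkA costs
  case case1 => simp
  case case2 =>
    rename_i cs hne ing h3 ih
    rw [slice3_eq] at ih ⊢
    have hlen : (List.drop 3 cs).length = cs.length - 3 := by simp
    rw [ih (by rw [hlen]; omega)]
    have hcount : (cs.length + 1) / 3 = ((cs.length - 3) + 1) / 3 + 1 := by omega
    rw [hlen, hcount, List.range_succ_eq_map]
    simp only [List.map_cons, List.map_map]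
    rw [ingAt_zero]
    congr 1
    apply List.map_congr_left
    intro k _
    simp only [Function.comp_apply]
    rw [← ingAt_succ]
  case case3 =>
    rename_i cs hne ing h3
    have hne0 : cs.length ≠ 0 := by simp [hne]
    have h1 : (cs.length + 1) / 3 = 1 := by omega
    rw [h1]
    simp only [List.range_one, List.map_cons, List.map_nil]
    rw [ingAt_zero]

lemma ingredientsB_eq (r : String) :
    pvIngredientsB r = (List.range (((pvCosts r).length + 1) / 3)).map (pvIngAt (pvCosts r)) := by
  simp only [pvIngredientsB, slice4_eq]
  rw [stride0_eq, stride1_eq, zip_range_eq _ _ _ _ (by omega)]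
  rw [List.map_map]
  apply List.map_congr_left
  intro k _
  simp only [Function.comp_apply, pvIngAt, pvCosts]

-- ===== VERDICT (by name: the statement is the Claim_ definition above) =====
theorem load_blueprints_spec : Claim_equal_load_blueprints := by
  intro lines _dom hpre
  unfold Spec_load_blueprints
  simp only [load_blueprints, load_blueprints_alt]
  rw [PySem.List.foldl_append_singleton_eq_map]
  simp only [List.nil_append]
  apply List.map_congr_left
  intro line hline
  obtain ⟨_hc, hsent⟩ := hpre line hline
  rw [PySem.List.foldl_append_singleton_eq_map]
  simp only [List.nil_append, List.map_map]
  apply List.map_congr_left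
  intro r hr
  have hrmem := List.mem_of_mem_filter hr
  have hrne : r ≠ "" := by have h2 := (List.mem_filter.mp hr).2; simpa using h2
  obtain ⟨hmod, _hvals⟩ := hsent r hrmem hrne
  simp only [Function.comp_apply]
  rw [slice4_eq, ingredientsB_eq]
  exact chunkA_eq _ (by simpa [pvCosts] using hmod)
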